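-- pv_equiv track=rewrite | github.com/samuelstevens/arxiv-edits | arxivedits/diff.py | get_unaligned_line_distribution
-- ===== SOURCE A (Python) =====
-- from typing import List, Tuple, Any
--
-- ParagraphDiff = List[Tuple[int, List[str]]]
--
-- def get_unaligned_line_distribution(diffs: ParagraphDiff) -> List[int]:
--     lengths_of_consecutive_different_paragraphs = []
--     pgidx = 0
--     modified = 0
--     while pgidx < len(diffs) and diffs[pgidx][0] != 0:
--         if diffs[pgidx][0] == -1:
--             modified += 1
--         pgidx += 1
--
--     if pgidx > 0:
--         lengths_of_consecutive_different_paragraphs.append(modified)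
--
--     FLAG_in_identical = True
--     length = 0
--     while pgidx < len(diffs):
--         code = diffs[pgidx][0]
--
--         if code == 0 and FLAG_in_identical:
--             pass
--         elif code == -1 and FLAG_in_identical:
--             FLAG_in_identical = False
--             length += 1
--         elif code == 0 and not FLAG_in_identical:
--             FLAG_in_identical = True
--             lengths_of_consecutive_different_paragraphs.append(length)
--             length = 0
--         elif code == -1 and not FLAG_in_identical:
--             length += 1
--
--         pgidx += 1
--
--     if not FLAG_in_identical:
--         lengths_of_consecutive_different_paragraphs.append(length)
--
--     return lengths_of_consecutive_different_paragraphs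
-- ===== SOURCE B (Python) =====
-- from itertools import groupby
--
-- def get_unaligned_line_distribution(diffs):
--     result = []
--     first = True
--     for is_aligned, group in groupby(diffs, key=lambda d: d[0] == 0):
--         if not is_aligned:
--             count = sum(1 for code, _ in group if code == -1)
--             if first or count > 0:
--                 result.append(count)
--         first = False
--     return result
-- ===== Notes on version B (the rewrite author's own statement) =====
-- stated objective: idiomatic
-- what changed: Replaced A's incremental two-loop state machine (flag + running length) by a two-phase group-then-reduce pass: split diffs into maximal aligned/unaligned groups (itertools.groupby keyed on code==0), then count -1 codes per unaligned group, emitting the count unconditionally for the leading group and only when positive for later groups.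
import Mathlib
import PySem

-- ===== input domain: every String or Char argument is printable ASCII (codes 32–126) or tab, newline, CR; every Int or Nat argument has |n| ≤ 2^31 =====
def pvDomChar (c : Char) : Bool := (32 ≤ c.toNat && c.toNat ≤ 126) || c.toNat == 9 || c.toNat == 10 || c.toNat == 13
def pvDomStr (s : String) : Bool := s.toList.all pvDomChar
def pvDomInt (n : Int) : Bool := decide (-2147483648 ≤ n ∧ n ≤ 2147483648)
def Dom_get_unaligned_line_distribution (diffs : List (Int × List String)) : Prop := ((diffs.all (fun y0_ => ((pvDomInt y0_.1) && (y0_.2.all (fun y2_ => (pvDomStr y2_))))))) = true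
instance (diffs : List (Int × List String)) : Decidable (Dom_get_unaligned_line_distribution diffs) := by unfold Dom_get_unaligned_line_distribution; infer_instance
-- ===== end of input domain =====

-- B replaces A's incremental two-loop state machine by a group-then-reduce two-phase pass (same behaviour, same cost).

-- ===== PORT A =====

-- first while loop: walk the leading nonzero prefix, counting codes == -1; returns (modified, remaining suffix)
def pvA_loop1 (modified : Int) : List (Int × List String) → Int × List (Int × List String)
  | [] => (modified, [])
  | (c, s) :: rest =>
      if c ≠ 0 then pvA_loop1 (if c = -1 then modified + 1 else modified) rest
      else (modified, (c, s) :: rest)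

-- second while loop: the FLAG_in_identical / length state machine; returns (acc, flag, length)
def pvA_loop2 (acc : List Int) (flag : Bool) (length : Int) :
    List (Int × List String) → List Int × Bool × Int
  | [] => (acc, flag, length)
  | (c, _) :: rest =>
      if c = 0 ∧ flag = true then pvA_loop2 acc flag length rest
      else if c = -1 ∧ flag = true then pvA_loop2 acc false (length + 1) rest
      else if c = 0 ∧ flag = false then pvA_loop2 (acc ++ [length]) true 0 rest
      else if c = -1 ∧ flag = false then pvA_loop2 acc flag (length + 1) rest
      else pvA_loop2 acc flag length rest

def get_unaligned_line_distribution (diffs : List (Int × List String)) : List Int :=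
  let (modified, rest) := pvA_loop1 0 diffs
  -- pgidx > 0 exactly when the first loop body ran at least once, i.e. diffs starts with a nonzero code
  let acc : List Int :=
    match diffs with
    | [] => []
    | (c, _) :: _ => if c ≠ 0 then [modified] else []
  let (acc2, flag, length) := pvA_loop2 acc true 0 rest
  if flag = false then acc2 ++ [length] else acc2

-- ===== PORT B =====

-- itertools.groupby keyed on (d[0] == 0): maximal runs of equal key, ported by hand
def pvB_groups : List (Int × List String) → List (Bool × List (Int × List String))
  | [] => []
  | (c, s) :: rest =>
      let k : Bool := c == 0
      (k, (c, s) :: rest.takeWhile (fun d => (d.1 == 0) == k)) ::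
        pvB_groups (rest.dropWhile (fun d => (d.1 == 0) == k))
termination_by l => l.length
decreasing_by
  simpa using Nat.lt_succ_of_le (List.length_dropWhile_le _ _)

-- sum(1 for code, _ in group if code == -1)
def pvB_count (g : List (Int × List String)) : Int :=
  g.foldl (fun n d => if d.1 = -1 then n + 1 else n) 0

-- body of B's for-loop over the groups: state (result, first)
def pvB_step (p : List Int × Bool) (g : Bool × List (Int × List String)) : List Int × Bool :=
  ( if g.1 then p.1
    else
      let count := pvB_count g.2
      if p.2 = true ∨ count > 0 then p.1 ++ [count] else p.1,
    false)

def get_unaligned_line_distribution_alt (diffs : List (Int × List String)) : List Int :=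
  ((pvB_groups diffs).foldl pvB_step ([], true)).1

-- ===== PRECONDITION & SPEC =====
def Spec_get_unaligned_line_distribution (diffs : List (Int × List String)) (out : List Int) : Prop := out = get_unaligned_line_distribution_alt diffs
instance (diffs : List (Int × List String)) (out : List Int) : Decidable (Spec_get_unaligned_line_distribution diffs out) := by unfold Spec_get_unaligned_line_distribution; infer_instance

-- ===== CLAIM (what is proved, stated in full; the proofs are below) =====
def Claim_equal_get_unaligned_line_distribution : Prop := ∀ (diffs : List (Int × List String)), Dom_get_unaligned_line_distribution diffs → Spec_get_unaligned_line_distribution diffs (get_unaligned_line_distribution diffs)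

-- ===== LEMMAS AND PROOFS =====

-- finishing step of A: append the open run length if the flag is down
def pvFinish (r : List Int × Bool × Int) : List Int :=
  if r.2.1 = false then r.1 ++ [r.2.2] else r.1

-- what B's loop emits for the groups after the first one
def pvTailEmit : List (Bool × List (Int × List String)) → List Int
  | [] => []
  | (k, g) :: gs =>
      (if k then [] else if pvB_count g > 0 then [pvB_count g] else []) ++ pvTailEmit gs

theorem pvB_count_shift (g : List (Int × List String)) (n : Int) :
    g.foldl (fun n d => if d.1 = -1 then n + 1 else n) n = n + pvB_count g := by
  induction g generalizing n with
  | nil => simp [pvB_count]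
  | cons d g ih =>
      rw [pvB_count, List.foldl_cons, List.foldl_cons,
          ih (if d.1 = -1 then n + 1 else n), ih (if d.1 = -1 then 0 + 1 else 0)]
      split_ifs <;> ring

theorem pvB_count_cons (d : Int × List String) (g : List (Int × List String)) :
    pvB_count (d :: g) = (if d.1 = -1 then 1 else 0) + pvB_count g := by
  simp only [pvB_count, List.foldl_cons]
  rw [pvB_count_shift]
  split_ifs <;> simp [pvB_count]

theorem pvB_count_nonneg (g : List (Int × List String)) : 0 ≤ pvB_count g := by
  induction g with
  | nil => simp [pvB_count]
  | cons d g ih => rw [pvB_count_cons]; split_ifs <;> omega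

-- prepending to the accumulator commutes with loop2
theorem pvA_loop2_acc (l : List (Int × List String)) (a acc : List Int) (flag : Bool) (n : Int) :
    pvA_loop2 (a ++ acc) flag n l =
      ((a ++ (pvA_loop2 acc flag n l).1), (pvA_loop2 acc flag n l).2) := by
  induction l generalizing acc flag n with
  | nil => simp [pvA_loop2]
  | cons d rest ih =>
      obtain ⟨c, s⟩ := d
      simp only [pvA_loop2]
      split_ifs <;> simp [ih, List.append_assoc]

theorem pvFinish_loop2_acc (l : List (Int × List String)) (a : List Int) (flag : Bool) (n : Int) :
    pvFinish (pvA_loop2 a flag n l) = a ++ pvFinish (pvA_loop2 [] flag n l) := by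
  have h := pvA_loop2_acc l a [] flag n
  simp only [List.append_nil] at h
  rw [h, pvFinish, pvFinish]
  split_ifs <;> simp

-- with the flag up and nothing pending, leading zero-coded entries are skipped
theorem pvA_loop2_skip_zeros (l : List (Int × List String)) (acc : List Int) :
    pvA_loop2 acc true 0 l = pvA_loop2 acc true 0 (l.dropWhile (fun d => d.1 == 0)) := by
  induction l with
  | nil => simp
  | cons d rest ih =>
      obtain ⟨c, s⟩ := d
      by_cases hc : c = 0
      · subst hc
        rw [List.dropWhile_cons_of_pos (by simp)]
        rw [show pvA_loop2 acc true 0 ((0, s) :: rest) = pvA_loop2 acc true 0 rest by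
          simp [pvA_loop2]]
        exact ih
      · rw [List.dropWhile_cons_of_neg (by simp [hc])]

-- with the flag down, a nonzero-coded segment just adds its -1 count to the pending length
theorem pvA_loop2_run (g : List (Int × List String)) (hg : ∀ d ∈ g, d.1 ≠ 0)
    (l : List (Int × List String)) (acc : List Int) (n : Int) :
    pvA_loop2 acc false n (g ++ l) = pvA_loop2 acc false (n + pvB_count g) l := by
  induction g generalizing n with
  | nil => simp [pvB_count]
  | cons d g ih =>
      obtain ⟨c, s⟩ := d
      have hc : c ≠ 0 := hg (c, s) (by simp)
      have hg' : ∀ d ∈ g, d.1 ≠ 0 := fun d hd => hg d (List.mem_cons_of_mem _ hd)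
      by_cases hm : c = -1
      · subst hm
        have hcc : pvB_count (((-1 : Int), s) :: g) = 1 + pvB_count g := by
          rw [pvB_count_cons]; norm_num
        rw [hcc]
        rw [show pvA_loop2 acc false n (((-1 : Int), s) :: g ++ l) =
              pvA_loop2 acc false (n + 1) (g ++ l) by simp [pvA_loop2]]
        rw [ih hg']
        rw [show n + 1 + pvB_count g = n + (1 + pvB_count g) from by ring]
      · have hcc : pvB_count ((c, s) :: g) = pvB_count g := by
          rw [pvB_count_cons]; simp [hm]
        rw [hcc]
        rw [show pvA_loop2 acc false n ((c, s) :: g ++ l) =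
              pvA_loop2 acc false n (g ++ l) by simp [pvA_loop2, hc, hm]]
        exact ih hg' n

-- with the flag up, a nonzero-coded segment either passes through (no -1) or lowers the flag with its count pending
theorem pvA_loop2_seg (g : List (Int × List String)) (hg : ∀ d ∈ g, d.1 ≠ 0)
    (l : List (Int × List String)) (acc : List Int) :
    pvA_loop2 acc true 0 (g ++ l) =
      if pvB_count g = 0 then pvA_loop2 acc true 0 l
      else pvA_loop2 acc false (pvB_count g) l := by
  induction g with
  | nil => simp [pvB_count]
  | cons d g ih =>
      obtain ⟨c, s⟩ := d
      have hc : c ≠ 0 := hg (c, s) (by simp)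
      have hg' : ∀ d ∈ g, d.1 ≠ 0 := fun d hd => hg d (List.mem_cons_of_mem _ hd)
      by_cases hm : c = -1
      · subst hm
        have hcc : pvB_count (((-1 : Int), s) :: g) = 1 + pvB_count g := by
          rw [pvB_count_cons]; norm_num
        rw [hcc]
        rw [show pvA_loop2 acc true 0 (((-1 : Int), s) :: g ++ l) =
              pvA_loop2 acc false (0 + 1) (g ++ l) by simp [pvA_loop2]]
        rw [pvA_loop2_run g hg' l acc (0 + 1)]
        have hge := pvB_count_nonneg g
        rw [if_neg (show ¬(1 + pvB_count g = 0) by omega)]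
        rw [show (0 : Int) + 1 + pvB_count g = 1 + pvB_count g from by ring]
      · have hcc : pvB_count ((c, s) :: g) = pvB_count g := by
          rw [pvB_count_cons]; simp [hm]
        rw [hcc]
        rw [show pvA_loop2 acc true 0 ((c, s) :: g ++ l) =
              pvA_loop2 acc true 0 (g ++ l) by simp [pvA_loop2, hc, hm]]
        exact ih hg'

-- closing out a pending run at a suffix that is empty or starts with a zero code
theorem pvFinish_close (r : List (Int × List String))
    (hr : r = [] ∨ ∃ d r2, r = d :: r2 ∧ d.1 = 0) (acc : List Int) (n : Int) :
    pvFinish (pvA_loop2 acc false n r) = acc ++ [n] ++ pvFinish (pvA_loop2 [] true 0 r) := by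
  rcases hr with h | ⟨d, r2, rfl, hd⟩
  · subst h; simp [pvA_loop2, pvFinish]
  · obtain ⟨c, s⟩ := d
    simp only at hd; subst hd
    rw [show pvA_loop2 acc false n ((0, s) :: r2) = pvA_loop2 (acc ++ [n]) true 0 r2 by
      simp [pvA_loop2]]
    rw [show pvA_loop2 ([] : List Int) true 0 ((0, s) :: r2) = pvA_loop2 [] true 0 r2 by
      simp [pvA_loop2]]
    exact pvFinish_loop2_acc r2 (acc ++ [n]) true 0

-- pvB_groups unfolded at a zero-coded head
theorem pvB_groups_cons_zero (s : List String) (rest : List (Int × List String)) :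
    pvB_groups (((0 : Int), s) :: rest) =
      ((true, (0, s) :: rest.takeWhile (fun d => d.1 == 0)) ::
        pvB_groups (rest.dropWhile (fun d => d.1 == 0))) := by
  rw [pvB_groups]
  simp

-- pvB_groups unfolded at a nonzero-coded head
theorem pvB_groups_cons_ne (c : Int) (hc : c ≠ 0) (s : List String)
    (rest : List (Int × List String)) :
    pvB_groups ((c, s) :: rest) =
      ((false, (c, s) :: rest.takeWhile (fun d => !(d.1 == 0))) ::
        pvB_groups (rest.dropWhile (fun d => !(d.1 == 0)))) := by
  rw [pvB_groups]
  have hk : (c == 0) = false := beq_eq_false_iff_ne.mpr hc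
  simp [hk]

-- after the first group, B's fold appends exactly the positive counts of the unaligned groups
theorem pvB_fold_tail (gs : List (Bool × List (Int × List String))) (acc : List Int) :
    (gs.foldl pvB_step (acc, false)).1 = acc ++ pvTailEmit gs := by
  induction gs generalizing acc with
  | nil => simp [pvTailEmit]
  | cons g gs ih =>
      obtain ⟨k, g⟩ := g
      simp only [List.foldl_cons, pvTailEmit, pvB_step]
      by_cases hk : k = true
      · subst hk; simpa using ih acc
      · simp only [Bool.not_eq_true] at hk; subst hk
        by_cases hcnt : pvB_count g > 0
        · simp [hcnt, ih, List.append_assoc]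
        · simp [hcnt, ih]

-- core equivalence: A's second loop (from a clean state) computes B's tail emission over the groups
theorem pvMain0 (l : List (Int × List String)) :
    pvFinish (pvA_loop2 [] true 0 l) = pvTailEmit (pvB_groups l) := by
  induction hn : l.length using Nat.strong_induction_on generalizing l with
  | _ n ih =>
    match l with
    | [] => simp [pvA_loop2, pvFinish, pvB_groups, pvTailEmit]
    | (c, s) :: rest =>
      by_cases hc : c = 0
      · subst hc
        rw [show pvA_loop2 ([] : List Int) true 0 ((0, s) :: rest) = pvA_loop2 [] true 0 rest by
          simp [pvA_loop2]]
        rw [pvA_loop2_skip_zeros]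
        rw [pvB_groups_cons_zero]
        rw [show pvTailEmit ((true, ((0:Int), s) :: rest.takeWhile (fun d => d.1 == 0)) ::
              pvB_groups (rest.dropWhile (fun d => d.1 == 0))) =
            pvTailEmit (pvB_groups (rest.dropWhile (fun d => d.1 == 0))) by
          simp [pvTailEmit]]
        exact ih _ (by subst hn; simpa using Nat.lt_succ_of_le (List.length_dropWhile_le _ _)) _ rfl
      · set P : Int × List String → Bool := fun d => !(d.1 == 0) with hP
        set g0 := rest.takeWhile P with hg0
        set r := rest.dropWhile P with hr0
        have hsplit : rest = g0 ++ r := (List.takeWhile_append_dropWhile ..).symm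
        have hgne : ∀ d ∈ (c, s) :: g0, d.1 ≠ 0 := by
          intro d hd
          rcases List.mem_cons.mp hd with h | h
          · subst h; exact hc
          · have := List.mem_takeWhile_imp h
            simpa [hP] using this
        have hkey : ∀ (l : List (Int × List String)) d r2, l.dropWhile P = d :: r2 → P d = false := by
          intro l
          induction l with
          | nil => intro d r2 h; simp at h
          | cons a l ihl =>
              intro d r2 h
              by_cases ha : P a = true
              · rw [List.dropWhile_cons_of_pos ha] at h; exact ihl d r2 h
              · rw [List.dropWhile_cons_of_neg ha] at h
                injection h with h1 h2
                subst h1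
                simpa using ha
        have hrshape : r = [] ∨ ∃ d r2, r = d :: r2 ∧ d.1 = 0 := by
          rcases hre : r with _ | ⟨d, r2⟩
          · exact Or.inl rfl
          · right
            refine ⟨d, r2, rfl, ?_⟩
            have hh := hkey rest d r2 (hr0.symm.trans hre)
            simpa [hP] using hh
        have hlen : r.length < n := by
          subst hn
          rw [hr0]
          simpa using Nat.lt_succ_of_le (List.length_dropWhile_le _ _)
        have hl : (c, s) :: rest = ((c, s) :: g0) ++ r := by rw [hsplit]; rfl
        have hA : pvFinish (pvA_loop2 [] true 0 ((c, s) :: rest)) =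
            pvFinish (if pvB_count ((c, s) :: g0) = 0 then pvA_loop2 [] true 0 r
              else pvA_loop2 [] false (pvB_count ((c, s) :: g0)) r) := by
          conv_lhs => rw [hl]
          rw [pvA_loop2_seg ((c, s) :: g0) hgne r []]
        have hB : pvTailEmit (pvB_groups ((c, s) :: rest)) =
            (if pvB_count ((c, s) :: g0) > 0 then [pvB_count ((c, s) :: g0)] else []) ++
              pvTailEmit (pvB_groups r) := by
          rw [pvB_groups_cons_ne c hc s rest]
          simp only [pvTailEmit]
          rw [← hP, ← hg0, ← hr0]
          simp
        rw [hA, hB]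
        by_cases hcnt : pvB_count ((c, s) :: g0) = 0
        · rw [if_pos hcnt, if_neg (by omega)]
          simpa using ih _ hlen r rfl
        · have hpos : pvB_count ((c, s) :: g0) > 0 := by
            have := pvB_count_nonneg ((c, s) :: g0); omega
          rw [if_neg hcnt, if_pos hpos]
          rw [pvFinish_close r hrshape [] (pvB_count ((c, s) :: g0))]
          rw [ih _ hlen r rfl]
          simp

-- A's first loop computes the -1 count of the leading nonzero segment and its suffix
theorem pvA_loop1_eq (l : List (Int × List String)) (m : Int) :
    pvA_loop1 m l = (m + pvB_count (l.takeWhile (fun d => !(d.1 == 0))),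
      l.dropWhile (fun d => !(d.1 == 0))) := by
  induction l generalizing m with
  | nil => simp [pvA_loop1, pvB_count]
  | cons d rest ih =>
      obtain ⟨c, s⟩ := d
      by_cases hc : c = 0
      · subst hc
        rw [pvA_loop1, if_neg (by simp)]
        rw [List.takeWhile_cons_of_neg (by simp), List.dropWhile_cons_of_neg (by simp)]
        simp [pvB_count]
      · rw [pvA_loop1, if_pos hc]
        rw [List.takeWhile_cons_of_pos (by simp [hc]), List.dropWhile_cons_of_pos (by simp [hc])]
        rw [ih, pvB_count_cons]
        by_cases hm : c = -1
        · simp [hm]; ring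
        · simp [hm]

-- ===== VERDICT (by name: the statement is the Claim_ definition above) =====
theorem get_unaligned_line_distribution_spec : Claim_equal_get_unaligned_line_distribution := by
  intro diffs _
  unfold Spec_get_unaligned_line_distribution
  unfold get_unaligned_line_distribution get_unaligned_line_distribution_alt
  match diffs with
  | [] => simp [pvA_loop1, pvA_loop2, pvB_groups]
  | (c, s) :: rest =>
    by_cases hc : c = 0
    · subst hc
      rw [pvA_loop1, if_neg (by simp)]
      rw [pvB_groups_cons_zero, List.foldl_cons]
      rw [show pvB_step (([] : List Int), true)
            (true, ((0:Int), s) :: rest.takeWhile (fun d => d.1 == 0)) = ([], false) by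
        simp [pvB_step]]
      rw [pvB_fold_tail]
      have h0 := pvMain0 (((0:Int), s) :: rest)
      rw [pvB_groups_cons_zero] at h0
      rw [show pvTailEmit ((true, ((0:Int), s) :: rest.takeWhile (fun d => d.1 == 0)) ::
            pvB_groups (rest.dropWhile (fun d => d.1 == 0))) =
          pvTailEmit (pvB_groups (rest.dropWhile (fun d => d.1 == 0))) by
        simp [pvTailEmit]] at h0
      simpa [pvFinish] using h0
    · rw [pvA_loop1_eq]
      dsimp only
      rw [if_pos hc]
      have hdw : List.dropWhile (fun (d : Int × List String) => !(d.1 == 0)) ((c, s) :: rest)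
          = rest.dropWhile (fun d => !(d.1 == 0)) := List.dropWhile_cons_of_pos (by simp [hc])
      have htw : List.takeWhile (fun (d : Int × List String) => !(d.1 == 0)) ((c, s) :: rest)
          = (c, s) :: rest.takeWhile (fun d => !(d.1 == 0)) := List.takeWhile_cons_of_pos (by simp [hc])
      rw [hdw, htw]
      rw [show (0:Int) + pvB_count ((c, s) :: rest.takeWhile (fun d => !(d.1 == 0)))
            = pvB_count ((c, s) :: rest.takeWhile (fun d => !(d.1 == 0))) from by ring]
      rw [pvB_groups_cons_ne c hc s rest, List.foldl_cons]
      rw [show pvB_step (([] : List Int), true)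
            (false, (c, s) :: rest.takeWhile (fun d => !(d.1 == 0))) =
          ([pvB_count ((c, s) :: rest.takeWhile (fun d => !(d.1 == 0)))], false) by
        simp [pvB_step]]
      rw [pvB_fold_tail]
      have h1 := pvFinish_loop2_acc (rest.dropWhile (fun d => !(d.1 == 0)))
        [pvB_count ((c, s) :: rest.takeWhile (fun d => !(d.1 == 0)))] true 0
      rw [pvMain0 (rest.dropWhile (fun d => !(d.1 == 0)))] at h1
      simpa [pvFinish] using h1
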